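-- pv_equiv track=rewrite | github.com/tomerni/PythonProjects | nonogram.py | get_intersection_row
-- ===== SOURCE A (Python) =====
-- def get_intersection_row(rows):
--     """
--     checks the rows for a place that is for sure 0 or 1
--     :param rows: all of the possible rows
--     :return: row with the intersections
--     """
--     if not rows:
--         return []
--     final_list = []
--     index = 0
--     while index < len(rows[0]):
--         counter_0 = 0
--         counter_1 = 0
--         for i in rows:
--             if i[index] == 0:
--                 counter_0 += 1
--             if i[index] == 1:
--                 counter_1 += 1
--         if counter_0 == len(rows):
--             final_list.append(0)
--         elif counter_1 == len(rows):
--             final_list.append(1)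
--         else:
--             final_list.append(-1)
--         index += 1
--     return final_list
-- ===== SOURCE B (Python) =====
-- def get_intersection_row(rows):
--     """Row-wise fold: carry a running per-column consensus vector instead of
--     scanning each column with counters."""
--     if not rows:
--         return []
--     consensus = [rows[0][i] for i in range(len(rows[0]))]
--     for row in rows[1:]:
--         consensus = [c if row[i] == c else -1 for i, c in enumerate(consensus)]
--     return [c if c == 0 or c == 1 else -1 for c in consensus]
-- ===== Notes on version B (the rewrite author's own statement) =====
-- stated objective: alternative
-- what changed: Replaces A's column-by-column scan with two counters per column by a single row-wise fold that carries a running consensus vector (cell stays its value while every row agrees, collapses to -1 otherwise), finishing with one pass mapping non-0/1 cells to -1.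
import Mathlib
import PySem

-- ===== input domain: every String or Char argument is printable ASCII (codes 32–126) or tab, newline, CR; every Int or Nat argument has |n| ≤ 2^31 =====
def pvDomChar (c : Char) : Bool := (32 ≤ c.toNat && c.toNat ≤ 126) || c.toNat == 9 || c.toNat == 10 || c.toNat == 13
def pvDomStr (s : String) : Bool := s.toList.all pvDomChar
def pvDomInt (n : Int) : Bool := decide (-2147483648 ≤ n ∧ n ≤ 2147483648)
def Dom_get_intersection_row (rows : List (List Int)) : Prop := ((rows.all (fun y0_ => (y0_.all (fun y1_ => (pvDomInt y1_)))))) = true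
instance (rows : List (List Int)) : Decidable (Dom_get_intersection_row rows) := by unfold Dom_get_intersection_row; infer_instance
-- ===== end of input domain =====

-- B replaces A's per-column counter scans by a single row-wise fold carrying a running
-- consensus vector — an alternative decomposition of the same cost.


-- ===== PORT A =====
def get_intersection_row (rows : List (List Int)) : List Int :=
  if rows = [] then []
  else
    (PySem.List.pyRange 0 (PySem.List.len (rows.headD [])) 1).foldl (fun final_list index =>
      let c := rows.foldl (fun (c : Int × Int) i =>
        ((if PySem.List.pyGet? i index = some 0 then c.1 + 1 else c.1),
         (if PySem.List.pyGet? i index = some 1 then c.2 + 1 else c.2))) (0, 0)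
      final_list ++
        [if c.1 = PySem.List.len rows then 0
         else if c.2 = PySem.List.len rows then 1 else -1]) []

-- ===== PORT B =====
-- Python's row[i] == c raises IndexError on a too-short row; pyGet? returns none there
-- (≠ some c), which only differs outside Pre_ below.
def get_intersection_row_alt (rows : List (List Int)) : List Int :=
  match rows with
  | [] => []
  | r0 :: rest =>
    (rest.foldl
      (fun consensus row =>
        (PySem.List.enumerate consensus).map
          (fun ic => if PySem.List.pyGet? row ic.1 = some ic.2 then ic.2 else -1))
      ((PySem.List.pyRange 0 (PySem.List.len r0) 1).map
        (fun i => PySem.List.pyGetD r0 i (-1)))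
    ).map (fun c => if c = 0 ∨ c = 1 then c else -1)

-- ===== PRECONDITION & SPEC =====
-- Pre_ excludes exactly the ragged inputs (some row shorter than rows[0]) on which
-- Python A raises IndexError (B raises there as well).
def Pre_get_intersection_row (rows : List (List Int)) : Prop :=
  ∀ r ∈ rows, (rows.headD []).length ≤ r.length
instance (rows : List (List Int)) : Decidable (Pre_get_intersection_row rows) := by
  unfold Pre_get_intersection_row; infer_instance
def pvWitness_get_intersection_row : List (List Int) := [[0, 1], [0, 0]]
def Spec_get_intersection_row (rows : List (List Int)) (out : List Int) : Prop := out = get_intersection_row_alt rows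
instance (rows : List (List Int)) (out : List Int) : Decidable (Spec_get_intersection_row rows out) := by unfold Spec_get_intersection_row; infer_instance

-- ===== CLAIM (what is proved, stated in full; the proofs are below) =====
def Claim_equal_get_intersection_row : Prop := ∀ (rows : List (List Int)), Dom_get_intersection_row rows → Pre_get_intersection_row rows → Spec_get_intersection_row rows (get_intersection_row rows)

-- ===== LEMMAS AND PROOFS =====

-- enumerate of a mapped enumerate keeps the indices and transforms the values.
lemma enumerate_map_enumerate {α β : Type} (g : Int × α → β) :
    ∀ (l : List α) (s : Int),
      PySem.List.enumerate ((PySem.List.enumerate l s).map g) s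
        = (PySem.List.enumerate l s).map (fun p => (p.1, g p)) := by
  intro l
  induction l with
  | nil => intro s; simp [PySem.List.enumerate_nil]
  | cons x t ih =>
      intro s
      simp [PySem.List.enumerate_cons, ih (s + 1)]

-- The row-wise consensus fold, characterised per cell: a cell keeps its initial value
-- while every remaining row agrees with it, and is -1 otherwise.
lemma fold_consensus (rest : List (List Int)) :
    ∀ (cons : List Int),
      rest.foldl
        (fun consensus row =>
          (PySem.List.enumerate consensus).map
            (fun ic => if PySem.List.pyGet? row ic.1 = some ic.2 then ic.2 else -1)) cons
      = (PySem.List.enumerate cons).map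
          (fun ic => if ∀ r ∈ rest, PySem.List.pyGet? r ic.1 = some ic.2 then ic.2 else -1) := by
  induction rest with
  | nil =>
      intro cons
      simp only [List.foldl_nil, List.not_mem_nil, false_implies, implies_true, if_true]
      rw [show (fun (ic : Int × Int) => ic.2) = (Prod.snd : Int × Int → Int) from rfl,
        PySem.List.map_snd_enumerate]
  | cons r t ih =>
      intro cons
      rw [List.foldl_cons, ih, enumerate_map_enumerate, List.map_map]
      refine List.map_congr_left (fun ic _ => ?_)
      by_cases h : PySem.List.pyGet? r ic.1 = some ic.2
      · simp [Function.comp, h]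
      · simp only [Function.comp_apply, if_neg h]
        rw [if_neg (show ¬ ∀ r' ∈ r :: t, PySem.List.pyGet? r' ic.1 = some ic.2 from
          fun hall => h (hall r (by simp)))]
        split_ifs <;> rfl

-- A's counter equals len(rows) iff every row has value a at the column.
lemma count_full_iff (rows : List (List Int)) (index : Int) (a : Option Int) :
    (rows.foldl (fun (c : Int) r => if PySem.List.pyGet? r index = a then c + 1 else c) 0
      = PySem.List.len rows) ↔ ∀ r ∈ rows, PySem.List.pyGet? r index = a := by
  have hfold : ∀ s : Int, rows.foldl
      (fun (c : Int) r => if PySem.List.pyGet? r index = a then c + 1 else c) s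
      = s + (rows.countP (fun r => decide (PySem.List.pyGet? r index = a)) : Int) := by
    induction rows with
    | nil => simp
    | cons r t ih =>
      intro s
      by_cases h : PySem.List.pyGet? r index = a <;>
        simp [List.foldl_cons, ih, h]; ring
  rw [hfold 0, PySem.List.len_eq, Int.zero_add, Int.natCast_inj, List.countP_eq_length]
  constructor
  · intro h r hr; exact of_decide_eq_true (h r hr)
  · intro h r hr; exact decide_eq_true (h r hr)

-- ===== VERDICT (by name: the statement is the Claim_ definition above) =====
theorem get_intersection_row_spec : Claim_equal_get_intersection_row := by
  intro rows _ _
  unfold Spec_get_intersection_row get_intersection_row get_intersection_row_alt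
  match rows with
  | [] => simp
  | r0 :: rest =>
    rw [if_neg (by simp)]
    simp only [PySem.List.foldl_append_singleton_eq_map]
    rw [fold_consensus]
    rw [PySem.List.enumerate_eq_map_pyRange _ (-1), List.map_map, List.map_map]
    have hlen : PySem.List.len ((PySem.List.pyRange 0 (PySem.List.len r0)).map
        (fun i => PySem.List.pyGetD r0 i (-1))) = PySem.List.len r0 := by
      simp [PySem.List.len_eq, PySem.List.length_pyRange_one]
    rw [hlen]
    simp only [List.headD_cons, List.nil_append]
    refine List.map_congr_left (fun j hj => ?_)
    obtain ⟨hj0, hjn⟩ := PySem.List.mem_pyRange_one.mp hj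
    have hjn' : j < (r0.length : Int) := by
      simpa [PySem.List.len_eq] using hjn
    have hv : PySem.List.pyGet? r0 j = some r0[j.toNat] :=
      PySem.List.pyGet?_eq_some_getElem r0 hj0 hjn'
    simp only [Function.comp_apply]
    rw [PySem.List.foldl_prod_mk
      (fun (a : Int) (i : List Int) => if PySem.List.pyGet? i j = some 0 then a + 1 else a)
      (fun (b : Int) (i : List Int) => if PySem.List.pyGet? i j = some 1 then b + 1 else b)
      (r0 :: rest) 0 0]
    rw [PySem.List.pyGetD_map_pyRange_of_nonneg _ _ _ _ hj0 (by simpa [PySem.List.len_eq] using hjn)]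
    rw [PySem.List.pyGetD_eq_getElem r0 (-1) hj0 hjn']
    by_cases h0 : ∀ r ∈ r0 :: rest, PySem.List.pyGet? r j = some 0
    · have hv0 : r0[j.toNat] = 0 := by
        have := h0 r0 (by simp); rw [hv] at this; exact Option.some.inj this
      rw [if_pos ((count_full_iff (r0 :: rest) j (some 0)).mpr h0)]
      rw [hv0, if_pos (fun r hr => by rw [h0 r (by simp [hr])])]
      simp
    · rw [if_neg (fun h => h0 ((count_full_iff (r0 :: rest) j (some 0)).mp h))]
      by_cases h1 : ∀ r ∈ r0 :: rest, PySem.List.pyGet? r j = some 1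
      · have hv1 : r0[j.toNat] = 1 := by
          have := h1 r0 (by simp); rw [hv] at this; exact Option.some.inj this
        rw [if_pos ((count_full_iff (r0 :: rest) j (some 1)).mpr h1)]
        rw [hv1, if_pos (fun r hr => by rw [h1 r (by simp [hr])])]
        simp
      · rw [if_neg (fun h => h1 ((count_full_iff (r0 :: rest) j (some 1)).mp h))]
        by_cases hrest : ∀ r ∈ rest, PySem.List.pyGet? r j = some r0[j.toNat]
        · rw [if_pos hrest]
          rw [if_neg ?_]
          rintro (hz | ho)
          · exact h0 (fun r hr => by
              rcases List.mem_cons.mp hr with rfl | hr'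
              · rw [hv, hz]
              · rw [hrest r hr', hz])
          · exact h1 (fun r hr => by
              rcases List.mem_cons.mp hr with rfl | hr'
              · rw [hv, ho]
              · rw [hrest r hr', ho])
        · rw [if_neg hrest]
          simp
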